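-- pv_equiv track=rewrite | github.com/yyellin/tacred-enrichment | path_to_re/gcn/supplement/corenlp_attributes.py | split_keep_delimiter
-- ===== SOURCE A (Python) =====
-- def split_keep_delimiter(tokens, delimiter):
--
--     fix_tokens = []
--
--     for token in tokens:
--         subtokens = token.split(delimiter)
--
--         if len(subtokens) == 1:
--             fix_tokens.append(token)
--
--         else:
--             fix_tokens.append(subtokens[0])
--
--             for subtoken in subtokens[1:]:
--                 fix_tokens.append(delimiter)
--                 fix_tokens.append(subtoken)
--
--     return fix_tokens
-- ===== SOURCE B (Python) =====
-- import re
--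
--
-- def split_keep_delimiter(tokens, delimiter):
--     if not delimiter:
--         # keep str.split's behaviour: an empty separator is an error
--         raise ValueError('empty separator')
--     pattern = re.compile('(%s)' % re.escape(delimiter))
--     return [piece for token in tokens for piece in pattern.split(token)]
-- ===== Notes on version B (the rewrite author's own statement) =====
-- stated objective: idiomatic
-- what changed: B replaces A's per-token special-case branch plus explicit interleaving loop by one flat comprehension over re.split with a capturing group, which already returns the pieces interleaved with the delimiter.
-- outside the precondition, e.g. on split_keep_delimiter([], ''): A returns [], B raises ValueError
import Mathlib
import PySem

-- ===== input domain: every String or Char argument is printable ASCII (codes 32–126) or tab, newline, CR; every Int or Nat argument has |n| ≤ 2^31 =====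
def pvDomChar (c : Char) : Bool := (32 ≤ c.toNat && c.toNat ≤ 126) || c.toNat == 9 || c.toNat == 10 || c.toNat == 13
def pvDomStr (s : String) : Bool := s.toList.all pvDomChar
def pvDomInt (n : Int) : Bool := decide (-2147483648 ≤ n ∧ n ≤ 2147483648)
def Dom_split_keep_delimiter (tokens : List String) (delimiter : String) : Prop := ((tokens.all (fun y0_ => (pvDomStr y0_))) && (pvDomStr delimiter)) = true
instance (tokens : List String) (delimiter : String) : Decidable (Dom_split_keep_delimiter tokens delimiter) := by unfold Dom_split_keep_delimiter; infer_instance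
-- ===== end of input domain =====

-- B replaces A's per-token special-case branch and explicit interleaving loop by one flat
-- comprehension over re.split with a capturing group (idiomatic; same cost).


-- ===== PORT A =====
def split_keep_delimiter (tokens : List String) (delimiter : String) : List String :=
  tokens.foldl
    (fun fix_tokens token =>
      match PySem.Str.split? token delimiter with
      | none => fix_tokens          -- token.split('') raises ValueError; excluded by Pre_
      | some subtokens =>
        if subtokens.length = 1 then
          fix_tokens ++ [token]
        else
          -- subtokens[0]: str.split never returns [], so the .getD "" default is never taken
          (PySem.List.slice subtokens (some 1) none).foldl
            (fun acc subtoken => acc ++ [delimiter, subtoken])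
            (fix_tokens ++ [(PySem.List.pyGet? subtokens 0).getD ""]))
    []

-- ===== PORT B =====
-- pattern.split(token) for the capturing-group pattern '(re.escape(delimiter))' is the list of
-- str.split pieces interleaved with the delimiter; the none branch (empty separator) is
-- excluded by Pre_ (B raises ValueError there).
def split_keep_delimiter_alt (tokens : List String) (delimiter : String) : List String :=
  tokens.flatMap (fun token =>
    List.intersperse delimiter ((PySem.Str.split? token delimiter).getD []))

-- ===== PRECONDITION & SPEC =====
-- Pre_ excludes the empty delimiter: there A raises ValueError from str.split on every token,
-- and B raises ValueError up front (so also on the empty token list, where A returns []).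
def Pre_split_keep_delimiter (_tokens : List String) (delimiter : String) : Prop :=
  delimiter ≠ ""
instance (tokens : List String) (delimiter : String) : Decidable (Pre_split_keep_delimiter tokens delimiter) := by unfold Pre_split_keep_delimiter; infer_instance

def pvWitness_split_keep_delimiter : List String × String := (["a,b", "c", ""], ",")

def Spec_split_keep_delimiter (tokens : List String) (delimiter : String) (out : List String) : Prop := out = split_keep_delimiter_alt tokens delimiter
instance (tokens : List String) (delimiter : String) (out : List String) : Decidable (Spec_split_keep_delimiter tokens delimiter out) := by unfold Spec_split_keep_delimiter; infer_instance

-- ===== CLAIM (what is proved, stated in full; the proofs are below) =====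
def Claim_equal_split_keep_delimiter : Prop := ∀ (tokens : List String) (delimiter : String), Dom_split_keep_delimiter tokens delimiter → Pre_split_keep_delimiter tokens delimiter → Spec_split_keep_delimiter tokens delimiter (split_keep_delimiter tokens delimiter)

-- ===== LEMMAS AND PROOFS =====

-- invariant of splitOn.go: it appends to acc.reverse a nonempty list of pieces whose
-- sep-join is cur.reverse ++ l (holds for every fuel)
lemma splitOn_go_inv (sep : List Char) :
    ∀ (fuel : Nat) (l cur : List Char) (acc : List (List Char)),
      ∃ r, r ≠ [] ∧ PySem.Chars.splitOn.go sep fuel l cur acc = acc.reverse ++ r ∧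
        PySem.Chars.join sep r = cur.reverse ++ l := by
  intro fuel
  induction fuel with
  | zero =>
    intro l cur acc
    exact ⟨[cur.reverse ++ l], by simp, by
      rw [PySem.Chars.splitOn.go.eq_def]; simp, by
      simp [PySem.Chars.join_singleton]⟩
  | succ fuel ih =>
    intro l cur acc
    cases l with
    | nil =>
      exact ⟨[cur.reverse], by simp, by
        rw [PySem.Chars.splitOn.go.eq_def]; simp, by
        simp [PySem.Chars.join_singleton]⟩
    | cons c rest =>
      rw [PySem.Chars.splitOn.go.eq_def]
      by_cases hp : sep.isPrefixOf (c :: rest) = true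
      · simp only [hp, if_true]
        obtain ⟨r', hr'ne, hgo, hjoin⟩ := ih (List.drop sep.length (c :: rest)) [] (cur.reverse :: acc)
        refine ⟨cur.reverse :: r', by simp, ?_, ?_⟩
        · rw [hgo]; simp
        · obtain ⟨q, rs, rfl⟩ : ∃ q rs, r' = q :: rs := by
            cases r' with
            | nil => exact absurd rfl hr'ne
            | cons q rs => exact ⟨q, rs, rfl⟩
          rw [PySem.Chars.join_cons_cons, hjoin]
          obtain ⟨t, ht⟩ := (List.isPrefixOf_iff_prefix.mp hp)
          rw [← ht, ht]
          simp [← ht]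
      · simp only [hp]
        obtain ⟨r', hr'ne, hgo, hjoin⟩ := ih rest (c :: cur) acc
        refine ⟨r', hr'ne, hgo, ?_⟩
        rw [hjoin]; simp
  
-- str.split with a nonempty separator never returns the empty list,
-- and if it returns a single piece that piece is the whole string
lemma splitOn_spec (s sep : List Char) :
    PySem.Chars.splitOn s sep ≠ [] ∧ PySem.Chars.join sep (PySem.Chars.splitOn s sep) = s := by
  obtain ⟨r, hne, hgo, hjoin⟩ := splitOn_go_inv sep (s.length + 1) s [] []
  unfold PySem.Chars.splitOn
  rw [hgo]
  simpa [hne] using hjoin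

lemma split?_some (t d : String) (hd : d ≠ "") :
    PySem.Str.split? t d =
      some ((PySem.Chars.splitOn t.toList d.toList).map String.ofList) := by
  have hne : d.toList.isEmpty = false := by
    simp [List.isEmpty_eq_false_iff, hd]
  simp [PySem.Str.split?, PySem.Chars.split?, hne]

-- intersperse as a flatMap tail
lemma intersperse_eq_flatMap (d s0 : String) (rest : List String) :
    List.intersperse d (s0 :: rest) = s0 :: rest.flatMap (fun st => [d, st]) := by
  induction rest generalizing s0 with
  | nil => simp
  | cons r1 rs ih => simp [List.intersperse, ih r1]

-- A's inner loop is a flatMap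
lemma inner_foldl (d : String) (rest init : List String) :
    rest.foldl (fun acc st => acc ++ [d, st]) init
      = init ++ rest.flatMap (fun st => [d, st]) := by
  induction rest generalizing init with
  | nil => simp
  | cons r rs ih => simp [ih, List.append_assoc]

-- one step of A's outer loop produces exactly B's contribution for that token
lemma step_eq (d t : String) (hd : d ≠ "") (acc : List String) :
    (match PySem.Str.split? t d with
      | none => acc
      | some subtokens =>
        if subtokens.length = 1 then
          acc ++ [t]
        else
          (PySem.List.slice subtokens (some 1) none).foldl
            (fun a subtoken => a ++ [d, subtoken])
            (acc ++ [(PySem.List.pyGet? subtokens 0).getD ""]))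
      = acc ++ List.intersperse d ((PySem.Str.split? t d).getD []) := by
  rw [split?_some t d hd]
  obtain ⟨hne, hjoin⟩ := splitOn_spec t.toList d.toList
  cases hcs : PySem.Chars.splitOn t.toList d.toList with
  | nil => exact absurd hcs hne
  | cons c0 crest =>
    cases crest with
    | nil =>
      have ht : String.ofList c0 = t := by
        rw [hcs, PySem.Chars.join_singleton] at hjoin
        simp [hjoin]
      simp only [List.map_cons, List.map_nil, List.length_cons, List.length_nil,
        Option.getD_some, ht]
      simp [List.intersperse]
    | cons c1 crs =>
      simp only [List.map_cons, List.length_cons, Option.getD_some]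
      rw [if_neg (by simp), intersperse_eq_flatMap]
      have hslice : PySem.List.slice (String.ofList c0 :: String.ofList c1 :: crs.map String.ofList)
            (some 1) none = String.ofList c1 :: crs.map String.ofList := by
        simp [PySem.List.slice]
      have hget : PySem.List.pyGet? (String.ofList c0 :: String.ofList c1 :: crs.map String.ofList) 0
          = some (String.ofList c0) := by
        simp only [PySem.List.pyGet?, PySem.List.pyIdx?]
        rw [if_pos le_rfl, if_pos (by exact_mod_cast Nat.succ_pos _)]
        simp
      rw [hslice, inner_foldl, hget]
      simp

lemma outer_foldl (tokens : List String) (d : String) (hd : d ≠ "") :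
    ∀ init : List String,
      tokens.foldl
        (fun fix_tokens token =>
          match PySem.Str.split? token d with
          | none => fix_tokens
          | some subtokens =>
            if subtokens.length = 1 then
              fix_tokens ++ [token]
            else
              (PySem.List.slice subtokens (some 1) none).foldl
                (fun acc subtoken => acc ++ [d, subtoken])
                (fix_tokens ++ [(PySem.List.pyGet? subtokens 0).getD ""]))
        init
      = init ++ tokens.flatMap (fun token =>
          List.intersperse d ((PySem.Str.split? token d).getD [])) := by
  induction tokens with
  | nil => intro init; simp
  | cons t ts ih =>
    intro init
    simp only [List.foldl_cons, List.flatMap_cons]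
    rw [step_eq d t hd init, ih, List.append_assoc]

-- ===== VERDICT (by name: the statement is the Claim_ definition above) =====
theorem split_keep_delimiter_spec : Claim_equal_split_keep_delimiter := by
  intro tokens delimiter _ hpre
  unfold Spec_split_keep_delimiter split_keep_delimiter split_keep_delimiter_alt
  exact (outer_foldl tokens delimiter hpre []).trans (by simp)
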